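-- pv_equiv track=rewrite | github.com/EG0RIAN/EGE | 2024/2603/01.py | foo
-- ===== SOURCE A (Python) =====
-- def foo(x, h):
--     if h == 3 and x >= 63:
--         return 1
--     elif h == 3 and x < 63:
--         return 0
--     elif h < 3 and x >= 63:
--         return 0
--     else:
--         if h % 2:
--             return foo(x + 1, h + 1) or foo(x + 4, h + 1) or foo(x * 5, h + 1)
--         else:
--             return foo(x + 1, h + 1) or foo(x + 4, h + 1) or foo(x * 5, h + 1)
-- ===== SOURCE B (Python) =====
-- def foo(x, h):
--     stack = [(x, h)]
--     while stack:
--         cx, ch = stack.pop()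
--         if ch == 3:
--             if cx >= 63:
--                 return 1
--         elif ch < 3 and cx < 63:
--             stack.append((cx * 5, ch + 1))
--             stack.append((cx + 4, ch + 1))
--             stack.append((cx + 1, ch + 1))
--     return 0
-- ===== Notes on version B (the rewrite author's own statement) =====
-- stated objective: alternative
-- what changed: Replaces A's three-way short-circuit recursion by an iterative depth-first search over an explicit stack of (x,h) states that returns 1 at the first winning terminal and 0 when the stack empties.
import Mathlib
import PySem

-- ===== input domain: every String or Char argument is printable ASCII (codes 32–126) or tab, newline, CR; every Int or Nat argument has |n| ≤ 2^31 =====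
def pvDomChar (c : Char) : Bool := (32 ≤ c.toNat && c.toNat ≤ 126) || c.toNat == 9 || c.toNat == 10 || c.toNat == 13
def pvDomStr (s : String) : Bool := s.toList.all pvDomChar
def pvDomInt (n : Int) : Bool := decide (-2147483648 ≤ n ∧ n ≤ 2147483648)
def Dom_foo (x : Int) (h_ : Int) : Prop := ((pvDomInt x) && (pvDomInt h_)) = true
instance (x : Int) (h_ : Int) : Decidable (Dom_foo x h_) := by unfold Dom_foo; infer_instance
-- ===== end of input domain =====

-- B replaces A's three-way recursive descent by an iterative DFS over an explicit stack of
-- (x, h) states (objective: alternative decomposition, same asymptotic cost).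

-- ===== PORT A =====
-- A's recursion increases h by 1 each call and stops at h = 3; fuel (4 - h_).toNat is exactly
-- the recursion depth Python uses when h_ ≤ 3 (for h_ > 3 Python never returns).
def fooAux : Nat → Int → Int → Int
  | 0, _, _ => 0
  | n + 1, x, h_ =>
    if h_ = 3 ∧ x ≥ 63 then 1
    else if h_ = 3 ∧ x < 63 then 0
    else if h_ < 3 ∧ x ≥ 63 then 0
    else
      -- Python `a or b or c` short-circuits: each operand is evaluated only if the
      -- previous ones were falsy; the nested ifs reproduce that evaluation order.
      if PySem.Int.mod h_ 2 ≠ 0 then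
        if fooAux n (x + 1) (h_ + 1) ≠ 0 then fooAux n (x + 1) (h_ + 1)
        else if fooAux n (x + 4) (h_ + 1) ≠ 0 then fooAux n (x + 4) (h_ + 1)
        else fooAux n (x * 5) (h_ + 1)
      else
        if fooAux n (x + 1) (h_ + 1) ≠ 0 then fooAux n (x + 1) (h_ + 1)
        else if fooAux n (x + 4) (h_ + 1) ≠ 0 then fooAux n (x + 4) (h_ + 1)
        else fooAux n (x * 5) (h_ + 1)

def foo (x : Int) (h_ : Int) : Int := fooAux (4 - h_).toNat x h_

-- ===== PORT B =====
-- termination measure for the stack loop: size of the full ternary tree rooted at height h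
def cost (h_ : Int) : Nat :=
  if h_ < 3 then 3 * cost (h_ + 1) + 1 else 1
termination_by (3 - h_).toNat
decreasing_by omega

def stackCost (st : List (Int × Int)) : Nat := (st.map (fun p => cost p.2)).sum

lemma cost_push {h_ : Int} (hlt : h_ < 3) : cost h_ = 3 * cost (h_ + 1) + 1 := by
  rw [cost]; simp [hlt]

lemma cost_pos (h_ : Int) : 0 < cost h_ := by
  rw [cost]; split <;> omega

-- the while loop of Source B: list head = top of Python's stack
def fooLoop : List (Int × Int) → Int
  | [] => 0
  | (cx, ch) :: st =>
    if ch = 3 then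
      if cx ≥ 63 then 1 else fooLoop st
    else if ch < 3 ∧ cx < 63 then
      fooLoop ((cx + 1, ch + 1) :: (cx + 4, ch + 1) :: (cx * 5, ch + 1) :: st)
    else fooLoop st
termination_by st => stackCost st
decreasing_by
  · simp only [stackCost, List.map_cons, List.sum_cons]
    have := cost_pos ch
    omega
  · rename_i _ h2
    simp only [stackCost, List.map_cons, List.sum_cons]
    rw [cost_push h2.1]
    omega
  · simp only [stackCost, List.map_cons, List.sum_cons]
    have := cost_pos ch
    omega

def foo_alt (x : Int) (h_ : Int) : Int := fooLoop [(x, h_)]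

-- ===== PRECONDITION & SPEC =====
-- Pre_foo excludes exactly h_ > 3, where A's recursion never reaches the h == 3 terminal
-- test and Python raises RecursionError; A returns normally on every input with h_ ≤ 3.
def Pre_foo (x : Int) (h_ : Int) : Prop := h_ ≤ 3
instance (x : Int) (h_ : Int) : Decidable (Pre_foo x h_) := by unfold Pre_foo; infer_instance
def pvWitness_foo : Int × Int := (5, 1)
def Spec_foo (x : Int) (h_ : Int) (out : Int) : Prop := out = foo_alt x h_
instance (x : Int) (h_ : Int) (out : Int) : Decidable (Spec_foo x h_ out) := by unfold Spec_foo; infer_instance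

-- ===== CLAIM (what is proved, stated in full; the proofs are below) =====
def Claim_equal_foo : Prop := ∀ (x : Int) (h_ : Int), Dom_foo x h_ → Pre_foo x h_ → Spec_foo x h_ (foo x h_)

-- ===== LEMMAS AND PROOFS =====

-- Python `a or b` on ints (first operand if truthy, else second) — proof-side abbreviation.
def pyOr (a b : Int) : Int := if a ≠ 0 then a else b

lemma stackCost_cons (p : Int × Int) (st : List (Int × Int)) :
    stackCost (p :: st) = cost p.2 + stackCost st := by
  simp [stackCost]

lemma foo_base (x : Int) : foo x 3 = if x ≥ 63 then 1 else 0 := by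
  show fooAux 1 x 3 = _
  by_cases hx : x ≥ 63 <;> simp [fooAux, hx]

lemma foo_prune {x h_ : Int} (hh : h_ < 3) (hx : x ≥ 63) : foo x h_ = 0 := by
  have h4 : (4 - h_).toNat = (3 - h_).toNat + 1 := by omega
  unfold foo
  rw [h4]
  have hne : ¬ h_ = 3 := by omega
  simp [fooAux, hne, hx, hh]

lemma foo_step {x h_ : Int} (hh : h_ < 3) (hx : x < 63) :
    foo x h_ = pyOr (foo (x + 1) (h_ + 1)) (pyOr (foo (x + 4) (h_ + 1)) (foo (x * 5) (h_ + 1))) := by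
  have h4 : (4 - h_).toNat = (3 - h_).toNat + 1 := by omega
  have h3 : (4 - (h_ + 1)).toNat = (3 - h_).toNat := by omega
  unfold foo
  rw [h4, h3]
  have hne : ¬ h_ = 3 := by omega
  have hxn : ¬ x ≥ 63 := by omega
  simp only [fooAux, hne, false_and, if_false, hxn, and_false]
  split <;> simp [pyOr]

lemma foo_01 (x h_ : Int) (hh : h_ ≤ 3) : foo x h_ = 0 ∨ foo x h_ = 1 := by
  have key : ∀ n : Nat, ∀ x h_ : Int, h_ ≤ 3 → (3 - h_).toNat ≤ n → foo x h_ = 0 ∨ foo x h_ = 1 := by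
    intro n
    induction n with
    | zero =>
      intro x h_ hh hn
      have : h_ = 3 := by omega
      subst this
      rw [foo_base]; split <;> simp
    | succ n ih =>
      intro x h_ hh hn
      rcases lt_or_eq_of_le hh with hlt | heq
      · by_cases hx : x ≥ 63
        · exact Or.inl (foo_prune hlt hx)
        · rw [foo_step hlt (by omega)]
          have r1 := ih (x + 1) (h_ + 1) (by omega) (by omega)
          have r2 := ih (x + 4) (h_ + 1) (by omega) (by omega)
          have r3 := ih (x * 5) (h_ + 1) (by omega) (by omega)
          unfold pyOr
          rcases r1 with h1 | h1 <;> rcases r2 with h2 | h2 <;> rcases r3 with h3 | h3 <;>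
            simp [h1, h2, h3]
      · subst heq; rw [foo_base]; split <;> simp
  exact key (3 - h_).toNat x h_ hh le_rfl

lemma pyOr_eq_one {a b c : Int} (ha : a = 0 ∨ a = 1) (hb : b = 0 ∨ b = 1) (hc : c = 0 ∨ c = 1) :
    (pyOr a (pyOr b c) = 1) ↔ (a = 1 ∨ b = 1 ∨ c = 1) := by
  unfold pyOr
  rcases ha with h | h <;> rcases hb with h' | h' <;> rcases hc with h'' | h'' <;>
    simp [h, h', h'']

lemma fooLoop_char (st : List (Int × Int)) (hst : ∀ p ∈ st, p.2 ≤ 3) :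
    fooLoop st = if st.any (fun p => decide (foo p.1 p.2 = 1)) then 1 else 0 := by
  generalize hm : stackCost st = m
  induction m using Nat.strong_induction_on generalizing st with
  | _ m ih =>
    match st with
    | [] => simp [fooLoop]
    | (cx, ch) :: st =>
      have hch : ch ≤ 3 := hst (cx, ch) (by simp)
      have hst' : ∀ p ∈ st, p.2 ≤ 3 := fun p hp => hst p (by simp [hp])
      have hcpos : 0 < cost ch := cost_pos ch
      rw [stackCost_cons] at hm
      have hm2 : cost ch + stackCost st = m := hm
      clear hm
      by_cases h3 : ch = 3
      · subst h3
        by_cases hx : cx ≥ 63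
        · rw [fooLoop, if_pos rfl, if_pos hx]
          have hv : foo cx 3 = 1 := by rw [foo_base]; simp [hx]
          simp [hv]
        · rw [fooLoop, if_pos rfl, if_neg hx,
            ih (stackCost st) (by omega) st hst' rfl]
          have hv : foo cx 3 = 0 := by rw [foo_base]; simp [hx]
          have hd : decide (foo cx 3 = 1) = false := by rw [hv]; rfl
          simp only [List.any_cons, hd, Bool.false_or]
      · have hlt : ch < 3 := by omega
        by_cases hx : cx < 63
        · rw [fooLoop, if_neg h3, if_pos (show ch < 3 ∧ cx < 63 from ⟨hlt, hx⟩)]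
          have hmeas : stackCost ((cx + 1, ch + 1) :: (cx + 4, ch + 1) :: (cx * 5, ch + 1) :: st) < m := by
            simp only [stackCost_cons]
            rw [cost_push hlt] at hm2
            omega
          have hall : ∀ p ∈ ((cx + 1, ch + 1) :: (cx + 4, ch + 1) :: (cx * 5, ch + 1) :: st),
              p.2 ≤ 3 := by
            intro p hp
            simp only [List.mem_cons] at hp
            rcases hp with h | h | h | h
            · subst h; show ch + 1 ≤ 3; omega
            · subst h; show ch + 1 ≤ 3; omega
            · subst h; show ch + 1 ≤ 3; omega
            · exact hst' p h
          rw [ih _ hmeas _ hall rfl]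
          have r1 := foo_01 (cx + 1) (ch + 1) (by omega)
          have r2 := foo_01 (cx + 4) (ch + 1) (by omega)
          have r3 := foo_01 (cx * 5) (ch + 1) (by omega)
          have hhead : (foo cx ch = 1) ↔
              (foo (cx + 1) (ch + 1) = 1 ∨ foo (cx + 4) (ch + 1) = 1 ∨ foo (cx * 5) (ch + 1) = 1) := by
            rw [foo_step hlt hx]; exact pyOr_eq_one r1 r2 r3
          by_cases hc : foo cx ch = 1
          · rcases hhead.mp hc with h | h | h <;> simp [List.any_cons, hc, h]
          · have hcne := hc
            rw [hhead] at hc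
            simp only [not_or] at hc
            simp only [List.any_cons, decide_eq_false hc.1, decide_eq_false hc.2.1,
              decide_eq_false hc.2.2, decide_eq_false hcne, Bool.false_or]
        · rw [fooLoop, if_neg h3, if_neg (show ¬ (ch < 3 ∧ cx < 63) by omega),
            ih (stackCost st) (by omega) st hst' rfl]
          have hv : foo cx ch = 0 := foo_prune hlt (by omega)
          have hd : decide (foo cx ch = 1) = false := by rw [hv]; rfl
          simp only [List.any_cons, hd, Bool.false_or]

-- ===== VERDICT (by name: the statement is the Claim_ definition above) =====
theorem foo_spec : Claim_equal_foo := by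
  intro x h_ _ hpre
  unfold Spec_foo foo_alt
  rw [fooLoop_char [(x, h_)] (by intro p hp; simp at hp; subst hp; exact hpre)]
  rcases foo_01 x h_ hpre with h | h <;> simp [h]
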